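-- pv_equiv track=rewrite | github.com/eduardorittner/Projeto-MC558 | bin_packing_to_battleship.py | bin_packing_para_batalha_naval
-- ===== SOURCE A (Python) =====
-- def bin_packing_para_batalha_naval(n, C, B, lista_ais):
--     # Verifica se a soma dos tamanhos dos itens é igual a C * B
--     if sum(lista_ais) != C * B:
--         raise ValueError("A soma dos tamanhos dos itens não é igual a C * B.")
--
--     # Calcula o número total de linhas e colunas
--     total_linhas = sum(lista_ais) + (n - 1)  # Adiciona linhas separadoras entre itens
--     total_colunas = B + (B - 1)  # Adiciona colunas separadoras entre bins
--
--     # Inicializa a grade com água ('~')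
--     grade = [['~' for _ in range(total_colunas)] for _ in range(total_linhas)]
--
--     # Inicializa os contadores de linhas
--     contagem_linhas = []
--
--     # Inicializa os contadores de colunas
--     contagem_colunas = []
--
--     # Frota (lista de comprimentos de navios)
--     frota = lista_ais.copy()
--
--     # Define os contadores de colunas
--     for b in range(B):
--         # As colunas dos bins estão nas posições b * 2 (devido aos separadores)
--         coluna_bin = b * 2
--         contagem_colunas.append(C)
--         if b < B - 1:
--             # Adiciona separador de colunas
--             contagem_colunas.append(0)
--     # Ajusta para o último bin (sem separador após o último bin)
--     if len(contagem_colunas) < total_colunas: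
--         contagem_colunas.append(0)
--
--     linha_atual = 0
--     for idx, ai in enumerate(lista_ais):
--         # Para cada item ai
--         comprimento_item = ai
--         # Linhas para este item
--         linhas_item = list(range(linha_atual, linha_atual + comprimento_item))
--         # Define contadores de linhas para as linhas do item
--         for r in linhas_item:
--             contagem_linhas.append(1)
--         linha_atual += comprimento_item
--         if idx < n - 1:
--             # Adiciona uma linha separadora
--             contagem_linhas.append(0)
--             linha_atual += 1
--
--         # Para cada bin
--         for b in range(B):
--             coluna_bin = b * 2
--             # Define '?' na grade para as faixas do item nos bins
--             for r in linhas_item: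
--                 grade[r][coluna_bin] = '?'
--
--     # Preenche as colunas separadoras com '~' e define contagem de colunas como 0
--     for c in range(total_colunas):
--         if c % 2 == 1:
--             # Coluna separadora
--             for r in range(total_linhas):
--                 grade[r][c] = '~'
--
--     # Prepara a saída como uma string
--     linhas_saida = []
--     for r in range(total_linhas):
--         linha_str = ' '.join(grade[r])
--         linhas_saida.append(f"{linha_str} {contagem_linhas[r]}")
--     linhas_saida.append(f"Contagem de colunas: {contagem_colunas}")
--     linhas_saida.append(f"Frota (comprimentos dos navios): {frota}")
--
--     # Retorna a saída como uma única string
--     return '\n'.join(linhas_saida)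
-- ===== SOURCE B (Python) =====
-- def bin_packing_para_batalha_naval(n, C, B, lista_ais):
--     if sum(lista_ais) != C * B:
--         raise ValueError("A soma dos tamanhos dos itens não é igual a C * B.")
--
--     total_colunas = 2 * B - 1
--     # the two row templates: bin columns alternate with separator columns
--     linha_navio = ' '.join('?' if c % 2 == 0 else '~' for c in range(total_colunas))
--     linha_agua = ' '.join('~' for _ in range(total_colunas))
--     contagem_colunas = [C if c % 2 == 0 else 0 for c in range(total_colunas)]
--
--     linhas_saida = []
--     for idx, ai in enumerate(lista_ais):
--         linhas_saida += [f"{linha_navio} 1"] * ai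
--         if idx < n - 1:
--             linhas_saida.append(f"{linha_agua} 0")
--     linhas_saida.append(f"Contagem de colunas: {contagem_colunas}")
--     linhas_saida.append(f"Frota (comprimentos dos navios): {lista_ais}")
--     return '\n'.join(linhas_saida)
-- ===== Notes on version B (the rewrite author's own statement) =====
-- stated objective: simpler
-- what changed: B drops A's mutable 2D grid, the per-bin cell-writing loops and the odd-column cleanup pass: it precomputes the two row templates (ship row, water row) and the alternating column-counter list, then emits every output line directly in one walk over lista_ais; Pre_ excludes inputs where A raises (sum mismatch, too few row counters) and malformed instances (negative sizes shifting a ship block, or n inconsistent with the list) where A's truncated/wrapped grid rows are accidental.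
-- outside the precondition, e.g. on bin_packing_para_batalha_naval(0, -1, -1, [0, 1]): A returns 'Contagem de colunas: []\nFrota (comprimentos dos navios): [0, 1]'
import Mathlib
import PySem

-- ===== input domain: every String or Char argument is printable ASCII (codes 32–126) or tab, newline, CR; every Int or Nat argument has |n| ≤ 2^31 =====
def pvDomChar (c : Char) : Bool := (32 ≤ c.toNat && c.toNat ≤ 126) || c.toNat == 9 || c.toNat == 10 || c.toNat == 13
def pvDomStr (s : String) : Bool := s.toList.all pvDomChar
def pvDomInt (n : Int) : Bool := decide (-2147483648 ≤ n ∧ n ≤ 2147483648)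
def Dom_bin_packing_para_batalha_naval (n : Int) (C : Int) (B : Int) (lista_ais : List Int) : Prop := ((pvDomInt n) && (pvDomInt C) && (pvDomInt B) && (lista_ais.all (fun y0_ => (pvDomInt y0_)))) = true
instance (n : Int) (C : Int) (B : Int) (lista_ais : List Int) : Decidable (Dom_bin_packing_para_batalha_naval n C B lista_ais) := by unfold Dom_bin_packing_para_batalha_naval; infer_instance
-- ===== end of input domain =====

-- B drops A's mutable 2D grid of cells, the per-bin column loop and the odd-column cleanup pass:
-- it precomputes the two row templates and the alternating column counters and emits every output
-- line directly while walking lista_ais once (objective: simpler; equivalence proved on Pre_).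

-- shared by both ports: Python's repr of a list of ints, e.g. "[1, 2]"
def pvIntListRepr (l : List Int) : String :=
  "[" ++ PySem.Str.join ", " (l.map PySem.Int.toStr) ++ "]"

-- ===== PORT A =====
-- Python "row[i] = v": a negative index wraps; out of range raises IndexError (kept in range by Pre_;
-- out of range it leaves the list unchanged here).
def pvSetIdx (xs : List String) (i : Int) (v : String) : List String :=
  let j := if i < 0 then i + xs.length else i
  if 0 ≤ j ∧ j < (xs.length : Int) then xs.set j.toNat v else xs

-- Python "grade[r][c] = v" (same index semantics, on the outer list)
def pvASet (g : List (List String)) (r c : Int) (v : String) : List (List String) :=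
  let j := if r < 0 then r + g.length else r
  if 0 ≤ j ∧ j < (g.length : Int) then g.set j.toNat (pvSetIdx (g.getD j.toNat []) c v) else g

-- body of A's "for idx, ai in enumerate(lista_ais)" loop; state = (linha_atual, contagem_linhas, grade)
def pvAItemStep (n B : Int) (st : Int × List Int × List (List String)) (p : Int × Int) :
    Int × List Int × List (List String) :=
  let linhas_item := PySem.List.pyRange st.1 (st.1 + p.2) 1
  let contagem_linhas := linhas_item.foldl (fun acc _ => acc ++ [(1 : Int)]) st.2.1
  let linha_atual := st.1 + p.2
  let st2 : Int × List Int :=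
    if p.1 < n - 1 then (linha_atual + 1, contagem_linhas ++ [(0 : Int)]) else (linha_atual, contagem_linhas)
  let grade := (PySem.List.pyRange 0 B 1).foldl
    (fun g b => linhas_item.foldl (fun g r => pvASet g r (b * 2) "?") g) st.2.2
  (st2.1, st2.2, grade)

def bin_packing_para_batalha_naval (n : Int) (C : Int) (B : Int) (lista_ais : List Int) : String :=
  if lista_ais.sum ≠ C * B then "" else   -- raise ValueError (excluded by Pre_)
  let total_linhas := lista_ais.sum + (n - 1)
  let total_colunas := B + (B - 1)
  let grade := (PySem.List.pyRange 0 total_linhas 1).map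
    (fun _ => (PySem.List.pyRange 0 total_colunas 1).map (fun _ => "~"))
  let frota := lista_ais
  let contagem_colunas := (PySem.List.pyRange 0 B 1).foldl
    (fun acc b => (acc ++ [C]) ++ (if b < B - 1 then [(0 : Int)] else [])) []
  let contagem_colunas :=
    if (contagem_colunas.length : Int) < total_colunas then contagem_colunas ++ [(0 : Int)] else contagem_colunas
  let st := (PySem.List.enumerate lista_ais 0).foldl (pvAItemStep n B) (0, ([] : List Int), grade)
  let grade := (PySem.List.pyRange 0 total_colunas 1).foldl
    (fun g c => if PySem.Int.mod c 2 = 1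
      then (PySem.List.pyRange 0 total_linhas 1).foldl (fun g r => pvASet g r c "~") g else g) st.2.2
  let linhas_saida := (PySem.List.pyRange 0 total_linhas 1).foldl
    (fun acc r => acc ++ [PySem.Str.join " " (PySem.List.pyGetD grade r []) ++ " " ++
                          PySem.Int.toStr (PySem.List.pyGetD st.2.1 r 0)]) []
  let linhas_saida := linhas_saida ++ ["Contagem de colunas: " ++ pvIntListRepr contagem_colunas]
  let linhas_saida := linhas_saida ++ ["Frota (comprimentos dos navios): " ++ pvIntListRepr frota]
  PySem.Str.join "\n" linhas_saida

-- ===== PORT B =====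
def bin_packing_para_batalha_naval_alt (n : Int) (C : Int) (B : Int) (lista_ais : List Int) : String :=
  if lista_ais.sum ≠ C * B then "" else   -- raise ValueError (excluded by Pre_)
  let total_colunas := 2 * B - 1
  let linha_navio := PySem.Str.join " "
    ((PySem.List.pyRange 0 total_colunas 1).map (fun c => if PySem.Int.mod c 2 = 0 then "?" else "~"))
  let linha_agua := PySem.Str.join " "
    ((PySem.List.pyRange 0 total_colunas 1).map (fun _ => "~"))
  let contagem_colunas := (PySem.List.pyRange 0 total_colunas 1).map
    (fun c => if PySem.Int.mod c 2 = 0 then C else (0 : Int))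
  let linhas_saida := (PySem.List.enumerate lista_ais 0).foldl
    (fun acc p => (acc ++ List.replicate p.2.toNat (linha_navio ++ " 1")) ++
                  (if p.1 < n - 1 then [linha_agua ++ " 0"] else [])) []
  PySem.Str.join "\n"
    (linhas_saida ++ ["Contagem de colunas: " ++ pvIntListRepr contagem_colunas,
                      "Frota (comprimentos dos navios): " ++ pvIntListRepr lista_ais])

-- ===== PRECONDITION & SPEC =====
-- Pre_ restricts to the inputs where A's grid bookkeeping is consistent: the bin sizes must sum to
-- C*B (else A raises ValueError), the number of emitted row lines (ship rows plus separators) must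
-- equal A's declared row count sum+n-1 (when it is smaller A raises IndexError reading a row counter;
-- when it is larger — a malformed instance, e.g. n ≤ 0 — A silently truncates rows), and, when there
-- is at least one bin, no negative "size" may shift a later ship block (a malformed instance on which
-- A wraps row indices around the grid).
def Pre_bin_packing_para_batalha_naval (n : Int) (C : Int) (B : Int) (lista_ais : List Int) : Prop :=
  lista_ais.sum = C * B
  ∧ (((lista_ais.map Int.toNat).sum : Nat) : Int)
      + ((min lista_ais.length (n - 1).toNat : Nat) : Int) = max (lista_ais.sum + (n - 1)) 0
  ∧ (1 ≤ B → ∀ k : Nat, k < lista_ais.length → 0 < lista_ais.getD k 0 →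
      (lista_ais.take k).sum = ((((lista_ais.take k).map Int.toNat).sum : Nat) : Int))
instance (n : Int) (C : Int) (B : Int) (lista_ais : List Int) : Decidable (Pre_bin_packing_para_batalha_naval n C B lista_ais) := by
  unfold Pre_bin_packing_para_batalha_naval; infer_instance

def pvWitness_bin_packing_para_batalha_naval : Int × Int × Int × List Int := (2, 2, 2, [3, 1])

def Spec_bin_packing_para_batalha_naval (n : Int) (C : Int) (B : Int) (lista_ais : List Int) (out : String) : Prop := out = bin_packing_para_batalha_naval_alt n C B lista_ais
instance (n : Int) (C : Int) (B : Int) (lista_ais : List Int) (out : String) : Decidable (Spec_bin_packing_para_batalha_naval n C B lista_ais out) := by unfold Spec_bin_packing_para_batalha_naval; infer_instance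

-- ===== CLAIM (what is proved, stated in full; the proofs are below) =====
def Claim_equal_bin_packing_para_batalha_naval : Prop := ∀ (n : Int) (C : Int) (B : Int) (lista_ais : List Int), Dom_bin_packing_para_batalha_naval n C B lista_ais → Pre_bin_packing_para_batalha_naval n C B lista_ais → Spec_bin_packing_para_batalha_naval n C B lista_ais (bin_packing_para_batalha_naval n C B lista_ais)

-- ===== LEMMAS AND PROOFS =====

-- row templates; tc is always B + (B - 1)
def pvWater (tc : Int) : List String := (PySem.List.pyRange 0 tc 1).map (fun _ => "~")
def pvShip (tc : Int) : List String :=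
  (PySem.List.pyRange 0 tc 1).map (fun c => if PySem.Int.mod c 2 = 0 then "?" else "~")
def pvShipK (tc k : Int) : List String :=
  (PySem.List.pyRange 0 tc 1).map (fun c => if PySem.Int.mod c 2 = 0 ∧ c < 2 * k then "?" else "~")
def pvRowB (tc : Int) (w : Bool) : List String := if w then pvShip tc else pvWater tc

-- the sequence of per-row counters (1 = ship row, 0 = separator row) from item index i on
def pvFlags (n i : Int) (l : List Int) : List Int :=
  match l with
  | [] => []
  | a :: t => (List.replicate a.toNat 1 ++ if i < n - 1 then [(0:Int)] else []) ++ pvFlags n (i + 1) t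

-- Python's wrapped index into a list of length L (for -L ≤ r < L)
def pvWrapIdx (L r : Int) : Int := if r < 0 then r + L else r

-- proof-side mirror of the grid writes: one boolean per row; flen tracks the flags emitted so far
def pvBMark (TLi : Int) (navio : List Bool) (r : Int) : List Bool :=
  navio.set (PySem.Int.mod r TLi).toNat true

def pvBItemStep (n TLi : Int) (st : Int × List Int × List Bool) (p : Int × Int) :
    Int × List Int × List Bool :=
  let navio := if 0 < TLi
    then (PySem.List.pyRange st.1 (st.1 + p.2) 1).foldl (pvBMark TLi) st.2.2 else st.2.2
  let contagem_linhas := st.2.1 ++ List.replicate p.2.toNat (1 : Int)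
  let linha_atual := st.1 + p.2
  let st2 : Int × List Int :=
    if p.1 < n - 1 then (linha_atual + 1, contagem_linhas ++ [(0 : Int)]) else (linha_atual, contagem_linhas)
  (st2.1, st2.2, navio)

-- every positive item block starts exactly at the row equal to the flags emitted so far, in bounds
def pvOk (TLi n : Int) : Int → Nat → Int → List Int → Prop
  | _, _, _, [] => True
  | la, flen, i, a :: t => (0 < a → la = (flen : Int) ∧ la + a ≤ TLi)
      ∧ pvOk TLi n (la + a + (if i < n - 1 then 1 else 0))
          (flen + a.toNat + (if i < n - 1 then 1 else 0 : Nat)) (i + 1) t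

-- generic: a fold whose step fixes g is the identity
lemma pv_foldl_fixed {α β : Type} (f : β → α → β) (g : β) (l : List α)
    (h : ∀ x ∈ l, f g x = g) : l.foldl f g = g := by
  induction l with
  | nil => rfl
  | cons x t ih =>
    simp only [List.foldl_cons, h x (by simp)]
    exact ih (fun y hy => h y (by simp [hy]))

-- in-range unfoldings of the two write primitives
lemma pvSetIdx_inrange (xs : List String) (i : Int) (v : String) (h1 : 0 ≤ i)
    (h2 : i < (xs.length : Int)) : pvSetIdx xs i v = xs.set i.toNat v := by
  simp only [pvSetIdx]
  rw [if_neg (show ¬ i < 0 by omega)]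
  rw [if_pos (show (0 : Int) ≤ i ∧ i < (xs.length : Int) from ⟨h1, h2⟩)]

lemma pvASet_inrange (g : List (List String)) (r c : Int) (v : String) (h1 : 0 ≤ r)
    (h2 : r < (g.length : Int)) :
    pvASet g r c v = g.set r.toNat (pvSetIdx (g.getD r.toNat []) c v) := by
  simp only [pvASet]
  rw [if_neg (show ¬ r < 0 by omega)]
  rw [if_pos (show (0 : Int) ≤ r ∧ r < (g.length : Int) from ⟨h1, h2⟩)]

lemma pvASet_wrap (g : List (List String)) (r c : Int) (v : String)
    (h1 : -(g.length : Int) ≤ r) (h2 : r < (g.length : Int)) :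
    pvASet g r c v = g.set (pvWrapIdx g.length r).toNat
      (pvSetIdx (g.getD (pvWrapIdx g.length r).toNat []) c v) := by
  simp only [pvASet, pvWrapIdx]
  by_cases hr : r < 0
  · rw [if_pos hr, if_pos (by constructor <;> omega)]
  · rw [if_neg hr, if_pos (by constructor <;> omega)]

lemma pvASet_length (g : List (List String)) (r c : Int) (v : String) :
    (pvASet g r c v).length = g.length := by
  simp only [pvASet]
  split_ifs <;> simp [List.length_set]

lemma pv_foldASet_length (c : Int) (R : List Int) (G : List (List String)) :
    (R.foldl (fun g r => pvASet g r c "?") G).length = G.length := by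
  induction R generalizing G with
  | nil => rfl
  | cons r R ih => simp only [List.foldl_cons]; rw [ih, pvASet_length]

lemma pvBMark_length (TLi : Int) (W : List Bool) (r : Int) :
    (pvBMark TLi W r).length = W.length := by
  simp [pvBMark]

lemma pv_foldBMark_length (TLi : Int) (R : List Int) (W : List Bool) :
    (R.foldl (pvBMark TLi) W).length = W.length := by
  induction R generalizing W with
  | nil => rfl
  | cons r R ih => simp only [List.foldl_cons]; rw [ih, pvBMark_length]

lemma pvSetIdx_idem (v : List String) (c : Int) (x : String) :
    pvSetIdx (pvSetIdx v c x) c x = pvSetIdx v c x := by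
  by_cases h : 0 ≤ (if c < 0 then c + (v.length : Int) else c)
      ∧ (if c < 0 then c + (v.length : Int) else c) < (v.length : Int)
  · rw [show pvSetIdx v c x = v.set (if c < 0 then c + (v.length : Int) else c).toNat x by
      simp only [pvSetIdx]; rw [if_pos h]]
    simp only [pvSetIdx, List.length_set]
    rw [if_pos h, List.set_set]
  · have hv : pvSetIdx v c x = v := by simp only [pvSetIdx]; rw [if_neg h]
    rw [hv]
    exact hv

-- pointwise effect of one wrapped write
lemma pvASet_getD (G : List (List String)) (r c : Int) (v : String)
    (h1 : -(G.length : Int) ≤ r) (h2 : r < (G.length : Int)) (i : Nat) (hi : i < G.length) :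
    (pvASet G r c v).getD i [] =
      if pvWrapIdx G.length r = (i : Int) then pvSetIdx (G.getD i []) c v else G.getD i [] := by
  rw [pvASet_wrap G r c v h1 h2]
  have hw : 0 ≤ pvWrapIdx G.length r ∧ pvWrapIdx G.length r < (G.length : Int) := by
    simp only [pvWrapIdx]; split <;> omega
  rw [List.getD_eq_getElem _ _ (by simpa using hi)]
  rw [List.getElem_set]
  by_cases he : (pvWrapIdx G.length r).toNat = i
  · rw [if_pos he, if_pos (by omega), he]
  · rw [if_neg he, if_neg (by omega), List.getD_eq_getElem _ _ hi]

-- pointwise effect of the whole row loop at one column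
lemma pv_foldASet (c : Int) (R : List Int) (G : List (List String))
    (hR : ∀ r ∈ R, -(G.length : Int) ≤ r ∧ r < (G.length : Int)) (i : Nat) (hi : i < G.length) :
    (R.foldl (fun g r => pvASet g r c "?") G).getD i [] =
      if ∃ r ∈ R, pvWrapIdx G.length r = (i : Int) then pvSetIdx (G.getD i []) c "?"
      else G.getD i [] := by
  induction R generalizing G with
  | nil => simp
  | cons r0 R ih =>
    simp only [List.foldl_cons]
    have hb := hR r0 (by simp)
    have hlen : (pvASet G r0 c "?").length = G.length := pvASet_length _ _ _ _
    have hR' : ∀ r ∈ R, -((pvASet G r0 c "?").length : Int) ≤ r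
        ∧ r < ((pvASet G r0 c "?").length : Int) := by
      rw [hlen]; exact fun r hr => hR r (by simp [hr])
    rw [ih (pvASet G r0 c "?") hR' (by omega)]
    rw [hlen]
    rw [pvASet_getD G r0 c "?" hb.1 hb.2 i hi]
    have hcons : (∃ r ∈ r0 :: R, pvWrapIdx G.length r = (i : Int))
        ↔ (pvWrapIdx G.length r0 = (i : Int) ∨ ∃ r ∈ R, pvWrapIdx G.length r = (i : Int)) := by
      constructor
      · rintro ⟨r, hr, he⟩
        rcases List.mem_cons.mp hr with rfl | hr
        · exact Or.inl he
        · exact Or.inr ⟨r, hr, he⟩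
      · rintro (he | ⟨r, hr, he⟩)
        · exact ⟨r0, List.mem_cons_self, he⟩
        · exact ⟨r, List.mem_cons_of_mem _ hr, he⟩
    by_cases h0 : pvWrapIdx G.length r0 = (i : Int)
    · rw [if_pos h0]
      rw [if_pos (hcons.mpr (Or.inl h0))]
      by_cases hrest : ∃ r ∈ R, pvWrapIdx G.length r = (i : Int)
      · rw [if_pos hrest, pvSetIdx_idem]
      · rw [if_neg hrest]
    · rw [if_neg h0]
      by_cases hrest : ∃ r ∈ R, pvWrapIdx G.length r = (i : Int)
      · rw [if_pos hrest, if_pos (hcons.mpr (Or.inr hrest))]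
      · rw [if_neg hrest, if_neg (fun h => (hcons.mp h).elim h0 hrest)]

-- Python's r % TLi agrees with the wrapped index for -TLi ≤ r < TLi
lemma pv_mod_wrap (TLi r : Int) (h0 : 0 < TLi) (h1 : -TLi ≤ r) (h2 : r < TLi) :
    PySem.Int.mod r TLi = pvWrapIdx TLi r := by
  rw [PySem.Int.mod_eq_emod_of_pos h0]
  simp only [pvWrapIdx]
  split
  · next hr =>
    rw [show r % TLi = (r + TLi) % TLi from (Int.add_emod_right r TLi).symm]
    exact Int.emod_eq_of_lt (by omega) (by omega)
  · exact Int.emod_eq_of_lt (by omega) (by omega)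

-- pointwise effect of the marking loop
lemma pv_foldBMark (TLi : Int) (R : List Int) (W : List Bool) (hT : (W.length : Int) = TLi)
    (hR : ∀ r ∈ R, -TLi ≤ r ∧ r < TLi) (i : Nat) (hi : i < W.length) :
    (R.foldl (pvBMark TLi) W).getD i false =
      if ∃ r ∈ R, pvWrapIdx TLi r = (i : Int) then true else W.getD i false := by
  induction R generalizing W with
  | nil => simp
  | cons r0 R ih =>
    simp only [List.foldl_cons]
    have hb := hR r0 (by simp)
    have h0 : 0 < TLi := by omega
    have hlen : (pvBMark TLi W r0).length = W.length := pvBMark_length _ _ _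
    rw [ih (pvBMark TLi W r0) (by rw [hlen]; exact hT) (fun r hr => hR r (by simp [hr]))
      (by omega)]
    have hstep : (pvBMark TLi W r0).getD i false =
        if pvWrapIdx TLi r0 = (i : Int) then true else W.getD i false := by
      simp only [pvBMark]
      rw [pv_mod_wrap TLi r0 h0 hb.1 hb.2]
      have hw : 0 ≤ pvWrapIdx TLi r0 ∧ pvWrapIdx TLi r0 < TLi := by
        simp only [pvWrapIdx]; split <;> omega
      rw [List.getD_eq_getElem _ _ (by simpa using hi), List.getElem_set]
      by_cases he : (pvWrapIdx TLi r0).toNat = i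
      · rw [if_pos he, if_pos (by omega)]
      · rw [if_neg he, if_neg (by omega), List.getD_eq_getElem _ _ hi]
    rw [hstep]
    have hcons : (∃ r ∈ r0 :: R, pvWrapIdx TLi r = (i : Int))
        ↔ (pvWrapIdx TLi r0 = (i : Int) ∨ ∃ r ∈ R, pvWrapIdx TLi r = (i : Int)) := by
      constructor
      · rintro ⟨r, hr, he⟩
        rcases List.mem_cons.mp hr with rfl | hr
        · exact Or.inl he
        · exact Or.inr ⟨r, hr, he⟩
      · rintro (he | ⟨r, hr, he⟩)
        · exact ⟨r0, List.mem_cons_self, he⟩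
        · exact ⟨r, List.mem_cons_of_mem _ hr, he⟩
    by_cases hx : pvWrapIdx TLi r0 = (i : Int)
    · rw [if_pos hx, if_pos (hcons.mpr (Or.inl hx))]
      split <;> rfl
    · rw [if_neg hx]
      by_cases hrest : ∃ r ∈ R, pvWrapIdx TLi r = (i : Int)
      · rw [if_pos hrest, if_pos (hcons.mpr (Or.inr hrest))]
      · rw [if_neg hrest, if_neg (fun h => (hcons.mp h).elim hx hrest)]

-- one column write turns pvShipK j into pvShipK (j+1)
lemma pv_setIdx_shipK (tc : Int) (j : Nat) (hlt : 2 * (j : Int) < tc) :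
    pvSetIdx (pvShipK tc (j : Int)) (2 * (j : Int)) "?" = pvShipK tc ((j : Int) + 1) := by
  have hlen : ((pvShipK tc (j : Int)).length : Int) = tc := by
    simp only [pvShipK, List.length_map, PySem.List.length_pyRange_one]
    omega
  rw [pvSetIdx_inrange _ _ _ (by omega) (by omega)]
  apply List.ext_getElem
  · simp [pvShipK, PySem.List.length_pyRange_one]
  · intro k h1 h2
    have hk : k < (tc - 0).toNat := by
      simpa [pvShipK, PySem.List.length_pyRange_one] using h2
    rw [List.getElem_set]
    simp only [pvShipK, List.getElem_map, PySem.List.getElem_pyRange_one, zero_add]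
    by_cases he : (2 * (j : Int)).toNat = k
    · have hkk : (k : Int) = 2 * (j : Int) := by omega
      rw [if_pos he, if_pos]
      refine ⟨?_, by omega⟩
      rw [hkk]
      exact (PySem.Int.mod_eq_zero_iff_dvd (2 * (j : Int)) 2).mpr ⟨(j : Int), by ring⟩
    · rw [if_neg he]
      congr 1
      simp only [eq_iff_iff]
      constructor
      · intro ⟨hev, hlt2⟩; exact ⟨hev, by omega⟩
      · intro ⟨hev, hlt2⟩
        refine ⟨hev, ?_⟩
        obtain ⟨q, hq⟩ := (PySem.Int.mod_eq_zero_iff_dvd _ _).mp hev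
        omega

-- writing an even in-range column into a full ship row changes nothing
lemma pv_setIdx_ship_even (tc : Int) (j : Nat) (hlt : 2 * (j : Int) < tc) :
    pvSetIdx (pvShip tc) (2 * (j : Int)) "?" = pvShip tc := by
  have hlen : ((pvShip tc).length : Int) = tc := by
    simp only [pvShip, List.length_map, PySem.List.length_pyRange_one]
    omega
  rw [pvSetIdx_inrange _ _ _ (by omega) (by omega)]
  have hval : (pvShip tc)[(2 * (j : Int)).toNat]'(by omega) = "?" := by
    simp only [pvShip, List.getElem_map, PySem.List.getElem_pyRange_one, zero_add]
    rw [if_pos]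
    rw [show ((((2 * (j : Int)).toNat : Nat)) : Int) = 2 * (j : Int) by omega]
    exact (PySem.Int.mod_eq_zero_iff_dvd (2 * (j : Int)) 2).mpr ⟨(j : Int), by ring⟩
  rw [← hval]
  exact List.set_getElem_self (by omega)

lemma pv_shipK_zero (tc : Int) : pvShipK tc 0 = pvWater tc := by
  unfold pvShipK pvWater
  apply List.map_congr_left
  intro c hc
  rw [PySem.List.mem_pyRange_one] at hc
  rw [if_neg (by omega)]

lemma pv_shipK_top (B : Int) : pvShipK (B + (B - 1)) B = pvShip (B + (B - 1)) := by
  unfold pvShipK pvShip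
  apply List.map_congr_left
  intro c hc
  rw [PySem.List.mem_pyRange_one] at hc
  by_cases hev : PySem.Int.mod c 2 = 0
  · rw [if_pos ⟨hev, by omega⟩, if_pos hev]
  · rw [if_neg (fun h => hev h.1), if_neg hev]

-- A's per-item counter fold appends a.toNat ones
lemma pv_hc (la a : Int) (F : List Int) :
    (PySem.List.pyRange la (la + a) 1).foldl (fun acc _ => acc ++ [(1 : Int)]) F
    = F ++ List.replicate a.toNat 1 := by
  rw [PySem.List.foldl_append_singleton_eq_map]
  congr 1
  rw [List.map_const']
  congr 1
  rw [PySem.List.length_pyRange_one]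
  omega

-- the double write loop of one item matches the row marking, seen through the templates
lemma pv_itemAB (B TLi : Int) (hB : 1 ≤ B) (W : List Bool) (hW : W.length = TLi.toNat)
    (la a : Int) (hbound : 0 < a → -TLi ≤ la ∧ la + a ≤ TLi) :
    (PySem.List.pyRange 0 B 1).foldl
      (fun g b => (PySem.List.pyRange la (la + a) 1).foldl (fun g r => pvASet g r (b * 2) "?") g)
      (W.map (pvRowB (B + (B - 1))))
    = ((if 0 < TLi then (PySem.List.pyRange la (la + a) 1).foldl (pvBMark TLi) W else W)).map
        (pvRowB (B + (B - 1))) := by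
  by_cases ha : a ≤ 0
  · rw [PySem.List.pyRange_one_eq_nil (by omega)]
    simp only [List.foldl_nil, ite_self]
    exact pv_foldl_fixed _ _ _ (fun x _ => rfl)
  · have hbd := hbound (by omega)
    have hTL : 0 < TLi := by omega
    have hWlen : (W.length : Int) = TLi := by omega
    rw [if_pos hTL]
    have hRb : ∀ r ∈ PySem.List.pyRange la (la + a) 1, -TLi ≤ r ∧ r < TLi := by
      intro r hr
      rw [PySem.List.mem_pyRange_one] at hr
      omega
    have hW'len : ((PySem.List.pyRange la (la + a) 1).foldl (pvBMark TLi) W).length = W.length :=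
      pv_foldBMark_length _ _ _
    have hchar : ∀ (i : Nat), i < W.length →
        ((PySem.List.pyRange la (la + a) 1).foldl (pvBMark TLi) W).getD i false =
          if ∃ r ∈ PySem.List.pyRange la (la + a) 1, pvWrapIdx TLi r = (i : Int) then true
          else W.getD i false := fun i hi => pv_foldBMark TLi _ W hWlen hRb i hi
    have key : ∀ j : Nat, (j : Int) ≤ B →
        (PySem.List.pyRange 0 (j : Int) 1).foldl
          (fun g b => (PySem.List.pyRange la (la + a) 1).foldl (fun g r => pvASet g r (b * 2) "?") g)
          (W.map (pvRowB (B + (B - 1))))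
        = (List.range W.length).map (fun i =>
            if W.getD i false then pvShip (B + (B - 1))
            else if ((PySem.List.pyRange la (la + a) 1).foldl (pvBMark TLi) W).getD i false
              then pvShipK (B + (B - 1)) (j : Int) else pvWater (B + (B - 1))) := by
      intro j
      induction j with
      | zero =>
        intro _
        rw [show ((0 : Nat) : Int) = 0 from rfl, PySem.List.pyRange_one_eq_nil (le_refl 0)]
        rw [List.foldl_nil]
        apply List.ext_getElem
        · simp
        · intro k h1 h2
          rw [List.getElem_map, List.getElem_map, List.getElem_range]
          rw [List.getD_eq_getElem _ _ (by simpa using h1)]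
          rw [pv_shipK_zero, ite_self]
          rfl
      | succ j ihj =>
        intro hj
        have hj' : (j : Int) ≤ B := by push_cast at hj ⊢; omega
        rw [show (((j + 1 : Nat)) : Int) = (j : Int) + 1 by push_cast; ring]
        rw [PySem.List.pyRange_one_succ_right (by omega)]
        rw [List.foldl_append, ihj hj']
        simp only [List.foldl_cons, List.foldl_nil]
        have hGlen : ((List.range W.length).map (fun i =>
            if W.getD i false then pvShip (B + (B - 1))
            else if ((PySem.List.pyRange la (la + a) 1).foldl (pvBMark TLi) W).getD i false
              then pvShipK (B + (B - 1)) (j : Int) else pvWater (B + (B - 1)))).length = W.length := by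
          simp
        have hRb' : ∀ r ∈ PySem.List.pyRange la (la + a) 1,
            -((((List.range W.length).map (fun i =>
            if W.getD i false then pvShip (B + (B - 1))
            else if ((PySem.List.pyRange la (la + a) 1).foldl (pvBMark TLi) W).getD i false
              then pvShipK (B + (B - 1)) (j : Int) else pvWater (B + (B - 1)))).length : Nat) : Int) ≤ r
            ∧ r < ((((List.range W.length).map (fun i =>
            if W.getD i false then pvShip (B + (B - 1))
            else if ((PySem.List.pyRange la (la + a) 1).foldl (pvBMark TLi) W).getD i false
              then pvShipK (B + (B - 1)) (j : Int) else pvWater (B + (B - 1)))).length : Nat) : Int) := by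
          rw [hGlen]
          intro r hr
          have := hRb r hr
          constructor <;> omega
        have h2j : 2 * (j : Int) < B + (B - 1) := by push_cast at hj; omega
        apply List.ext_getElem
        · rw [pv_foldASet_length]
          simp
        · intro k h1 h2
          have hkW : k < W.length := by simpa using h2
          have h1' : k < ((List.range W.length).map (fun i =>
            if W.getD i false then pvShip (B + (B - 1))
            else if ((PySem.List.pyRange la (la + a) 1).foldl (pvBMark TLi) W).getD i false
              then pvShipK (B + (B - 1)) (j : Int) else pvWater (B + (B - 1)))).length := by
            simpa using hkW
          rw [← List.getD_eq_getElem _ [] (by rwa [pv_foldASet_length])]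
          rw [pv_foldASet ((j : Int) * 2) _ _ hRb' k h1']
          rw [hGlen]
          rw [hWlen]
          rw [List.getD_eq_getElem _ _ h1', List.getElem_map, List.getElem_range,
            List.getElem_map, List.getElem_range]
          rw [show (j : Int) * 2 = 2 * (j : Int) by ring]
          by_cases hw : W.getD k false
          · rw [if_pos hw, if_pos hw]
            split
            · exact pv_setIdx_ship_even (B + (B - 1)) j h2j
            · rfl
          · rw [if_neg hw, if_neg hw]
            by_cases hhit : ∃ r ∈ PySem.List.pyRange la (la + a) 1, pvWrapIdx TLi r = (k : Int)
            · have hmark : ((PySem.List.pyRange la (la + a) 1).foldl (pvBMark TLi) W).getD k false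
                  = true := by rw [hchar k hkW, if_pos hhit]
              rw [if_pos hhit, hmark, if_pos rfl, if_pos rfl]
              exact pv_setIdx_shipK (B + (B - 1)) j h2j
            · have hmark : ((PySem.List.pyRange la (la + a) 1).foldl (pvBMark TLi) W).getD k false
                  = W.getD k false := by rw [hchar k hkW, if_neg hhit]
              rw [if_neg hhit, hmark, if_neg hw, if_neg hw]
    have hfin := key B.toNat (by omega)
    rw [show ((B.toNat : Nat) : Int) = B by omega] at hfin
    rw [hfin]
    apply List.ext_getElem
    · simp [hW'len]
    · intro k h1 h2
      have hkW : k < W.length := by simpa using h1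
      rw [List.getElem_map, List.getElem_range, List.getElem_map]
      rw [pv_shipK_top]
      rw [← List.getD_eq_getElem _ false (by simpa [hW'len] using h2)]
      by_cases hw : W.getD k false
      · rw [if_pos hw]
        have : ((PySem.List.pyRange la (la + a) 1).foldl (pvBMark TLi) W).getD k false = true := by
          rw [hchar k hkW]
          split
          · rfl
          · exact hw
        rw [this]
        rfl
      · rw [if_neg hw]
        cases hmk : ((PySem.List.pyRange la (la + a) 1).foldl (pvBMark TLi) W).getD k false
        · rfl
        · rfl

-- A's item loop simulates the marking loop through the templates (B ≥ 1, all writes in bounds)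
lemma pv_mainAB (n B TLi : Int) (hB : 1 ≤ B) : ∀ (l : List Int) (i la : Int) (flen : Nat)
    (F : List Int) (W : List Bool), W.length = TLi.toNat → pvOk TLi n la flen i l →
    (PySem.List.enumerate l i).foldl (pvAItemStep n B) (la, F, W.map (pvRowB (B + (B - 1))))
    = (((PySem.List.enumerate l i).foldl (pvBItemStep n TLi) (la, F, W)).1,
       ((PySem.List.enumerate l i).foldl (pvBItemStep n TLi) (la, F, W)).2.1,
       ((PySem.List.enumerate l i).foldl (pvBItemStep n TLi) (la, F, W)).2.2.map
         (pvRowB (B + (B - 1)))) := by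
  intro l
  induction l with
  | nil =>
    intro i la flen F W _ _
    simp [PySem.List.enumerate_nil]
  | cons a t ih =>
    intro i la flen F W hW hok
    have hok1 := hok.1
    have hok2 := hok.2
    have hbound : 0 < a → -TLi ≤ la ∧ la + a ≤ TLi := by
      intro ha
      obtain ⟨he, hle⟩ := hok1 ha
      constructor <;> omega
    rw [PySem.List.enumerate_cons]
    simp only [List.foldl_cons]
    have hmark_len : (if 0 < TLi then (PySem.List.pyRange la (la + a) 1).foldl (pvBMark TLi) W
        else W).length = TLi.toNat := by
      split
      · rw [pv_foldBMark_length]; exact hW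
      · exact hW
    by_cases hsep : i < n - 1
    · rw [if_pos hsep] at hok2
      simp only [pvAItemStep, pvBItemStep, if_pos hsep]
      rw [pv_hc]
      rw [pv_itemAB B TLi hB W hW la a hbound]
      exact ih (i + 1) (la + a + 1) _ (F ++ List.replicate a.toNat 1 ++ [(0 : Int)]) _ hmark_len hok2
    · rw [if_neg hsep] at hok2
      simp only [pvAItemStep, pvBItemStep, if_neg hsep]
      rw [pv_hc]
      rw [pv_itemAB B TLi hB W hW la a hbound]
      have := ih (i + 1) (la + a) _ (F ++ List.replicate a.toNat 1) _ hmark_len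
        (by rw [show la + a = la + a + 0 by ring]; exact hok2)
      exact this

-- the contagem_linhas component of either fold is the flag sequence
lemma pv_flagsA (n B : Int) : ∀ (l : List Int) (i : Int) (st : Int × List Int × List (List String)),
    ((PySem.List.enumerate l i).foldl (pvAItemStep n B) st).2.1 = st.2.1 ++ pvFlags n i l := by
  intro l
  induction l with
  | nil => intro i st; simp [pvFlags, PySem.List.enumerate_nil]
  | cons a t ih =>
    intro i st
    rw [PySem.List.enumerate_cons]
    simp only [List.foldl_cons]
    rw [ih (i + 1)]
    by_cases hsep : i < n - 1
    · simp only [pvAItemStep, if_pos hsep]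
      rw [pv_hc]
      simp [pvFlags, if_pos hsep]
    · simp only [pvAItemStep, if_neg hsep]
      rw [pv_hc]
      simp [pvFlags, if_neg hsep]

-- the eh_navio component keeps its length
lemma pv_navioB_len (n TLi : Int) : ∀ (l : List Int) (i : Int) (st : Int × List Int × List Bool),
    ((PySem.List.enumerate l i).foldl (pvBItemStep n TLi) st).2.2.length = st.2.2.length := by
  intro l
  induction l with
  | nil => intro i st; simp [PySem.List.enumerate_nil]
  | cons a t ih =>
    intro i st
    rw [PySem.List.enumerate_cons]
    simp only [List.foldl_cons]
    rw [ih (i + 1)]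
    simp only [pvBItemStep]
    split
    · rw [pv_foldBMark_length]
    · rfl

-- with no bins there are no grid writes at all
lemma pv_gradeA_Ble0 (n B : Int) (hB : B ≤ 0) : ∀ (l : List Int) (i : Int)
    (st : Int × List Int × List (List String)),
    ((PySem.List.enumerate l i).foldl (pvAItemStep n B) st).2.2 = st.2.2 := by
  intro l
  induction l with
  | nil => intro i st; simp [PySem.List.enumerate_nil]
  | cons a t ih =>
    intro i st
    rw [PySem.List.enumerate_cons]
    simp only [List.foldl_cons]
    rw [ih (i + 1)]
    simp only [pvAItemStep, PySem.List.pyRange_one_eq_nil hB, List.foldl_nil]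

-- the odd-column pass leaves every rendered row unchanged
lemma pv_row_oddB (tc c : Int) (w : Bool) (hodd : PySem.Int.mod c 2 = 1) (h0 : 0 ≤ c)
    (hlt : c < tc) : pvSetIdx (pvRowB tc w) c "~" = pvRowB tc w := by
  have hlen : ((pvRowB tc w).length : Int) = tc := by
    unfold pvRowB pvShip pvWater
    split <;> simp [PySem.List.length_pyRange_one] <;> omega
  rw [pvSetIdx_inrange (pvRowB tc w) c "~" h0 (by rw [hlen]; exact hlt)]
  have hval : (pvRowB tc w)[c.toNat]'(by omega) = "~" := by
    unfold pvRowB pvShip pvWater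
    split
    · rw [List.getElem_map]
      rw [PySem.List.getElem_pyRange_one]
      rw [if_neg (by rw [show (0 : Int) + (c.toNat : Int) = c by omega, hodd]; omega)]
    · rw [List.getElem_map]
  rw [← hval]
  exact List.set_getElem_self (by omega)

lemma pv_sep_passB (tc TLi : Int) (W : List Bool) (hT : TLi ≤ (W.length : Int)) :
    (PySem.List.pyRange 0 tc 1).foldl
      (fun g c => if PySem.Int.mod c 2 = 1
        then (PySem.List.pyRange 0 TLi 1).foldl (fun g r => pvASet g r c "~") g
        else g) (W.map (pvRowB tc)) = W.map (pvRowB tc) := by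
  apply pv_foldl_fixed
  intro c hc
  rw [PySem.List.mem_pyRange_one] at hc
  split
  · next hodd =>
    apply pv_foldl_fixed
    intro r hr
    rw [PySem.List.mem_pyRange_one] at hr
    have hrlen : r < ((W.map (pvRowB tc)).length : Int) := by
      simp only [List.length_map]; omega
    rw [pvASet_inrange _ _ _ _ hr.1 hrlen]
    have hget : (W.map (pvRowB tc)).getD r.toNat [] = pvRowB tc (W.getD r.toNat false) := by
      rw [List.getD_eq_getElem _ _ (by simp only [List.length_map]; omega)]
      rw [List.getD_eq_getElem _ _ (by omega)]
      rw [List.getElem_map]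
    rw [hget, pv_row_oddB tc c _ hodd hc.1 hc.2]
    rw [show pvRowB tc (W.getD r.toNat false)
        = (W.map (pvRowB tc))[r.toNat]'(by simp only [List.length_map]; omega) by
      rw [List.getElem_map, List.getD_eq_getElem _ _ (by omega)]]
    exact List.set_getElem_self (by simp only [List.length_map]; omega)
  · rfl

-- A's contagem_colunas loop, unrolled from the front: the alternating pattern
def pvGPat (C : Int) : Nat → List Int
  | 0 => [C]
  | j + 1 => [C, 0] ++ pvGPat C j

lemma pvGPat_len (C : Int) (j : Nat) : (pvGPat C j).length = 2 * j + 1 := by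
  induction j with
  | zero => rfl
  | succ j ih => simp [pvGPat, ih]; omega

lemma pv_colsA (C B : Int) : ∀ (j : Nat) (a : Int) (acc : List Int), a + j = B - 1 →
    (PySem.List.pyRange a B 1).foldl
      (fun acc b => (acc ++ [C]) ++ (if b < B - 1 then [(0 : Int)] else [])) acc
    = acc ++ pvGPat C j := by
  intro j
  induction j with
  | zero =>
    intro a acc ha
    rw [PySem.List.pyRange_one_cons (by omega), PySem.List.pyRange_one_eq_nil (by omega)]
    simp [if_neg (show ¬ a < B - 1 by omega), pvGPat]
  | succ j ih =>
    intro a acc ha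
    rw [PySem.List.pyRange_one_cons (by push_cast at ha; omega)]
    simp only [List.foldl_cons]
    rw [if_pos (by push_cast at ha; omega)]
    rw [ih (a + 1) _ (by push_cast at ha ⊢; omega)]
    simp [pvGPat]

lemma pv_rangePat (C : Int) : ∀ (j : Nat),
    (List.range (2 * j + 1)).map (fun k => if k % 2 = 0 then C else (0 : Int)) = pvGPat C j := by
  intro j
  induction j with
  | zero => simp [pvGPat]
  | succ j ih =>
    have hr : List.range (2 * j + 1 + 1 + 1)
        = 0 :: Nat.succ 0 :: (List.range (2 * j + 1)).map (Nat.succ ∘ Nat.succ) := by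
      rw [List.range_succ_eq_map, List.range_succ_eq_map, List.map_cons, List.map_map]
    rw [show 2 * (j + 1) + 1 = 2 * j + 1 + 1 + 1 by omega, hr, List.map_cons, List.map_cons,
      List.map_map]
    have hm : List.map ((fun k => if k % 2 = 0 then C else (0 : Int)) ∘ (Nat.succ ∘ Nat.succ))
        (List.range (2 * j + 1)) = pvGPat C j := by
      refine (List.map_congr_left (fun k _ =>
        show ((fun k => if k % 2 = 0 then C else (0 : Int)) ∘ (Nat.succ ∘ Nat.succ)) k
            = (fun k => if k % 2 = 0 then C else (0 : Int)) k from by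
          simp only [Function.comp_apply]
          simp only [show (Nat.succ (Nat.succ k)) % 2 = k % 2 from by omega])).trans ih
    rw [hm]
    simp [pvGPat]

lemma pv_colsB (C : Int) : ∀ (j : Nat),
    (PySem.List.pyRange 0 (2 * (j : Int) + 1) 1).map
      (fun c => if PySem.Int.mod c 2 = 0 then C else (0 : Int)) = pvGPat C j := by
  intro j
  rw [PySem.List.pyRange_one, List.map_map]
  rw [show (2 * (j : Int) + 1 - 0).toNat = 2 * j + 1 by omega]
  have hfun : ((fun c => if PySem.Int.mod c 2 = 0 then C else (0 : Int)) ∘ fun k : Nat => (0 : Int) + (k : Int))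
      = (fun k : Nat => if k % 2 = 0 then C else (0 : Int)) := by
    funext k
    simp only [Function.comp_apply, zero_add]
    rw [show ((2 : Int)) = (((2 : Nat)) : Int) from rfl, PySem.Int.mod_natCast]
    by_cases h : k % 2 = 0
    · simp [h]
    · rw [if_neg (show ¬(((k % 2 : Nat)) : Int) = 0 from by exact_mod_cast h), if_neg h]
  rw [hfun]
  exact pv_rangePat C j

-- the assembled column-counter equality (both sides of the ports)
lemma pv_cols (C B : Int) :
    (if (((PySem.List.pyRange 0 B 1).foldl
        (fun acc b => (acc ++ [C]) ++ (if b < B - 1 then [(0 : Int)] else [])) []).length : Int)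
          < B + (B - 1)
      then ((PySem.List.pyRange 0 B 1).foldl
        (fun acc b => (acc ++ [C]) ++ (if b < B - 1 then [(0 : Int)] else [])) []) ++ [(0 : Int)]
      else ((PySem.List.pyRange 0 B 1).foldl
        (fun acc b => (acc ++ [C]) ++ (if b < B - 1 then [(0 : Int)] else [])) []))
      = (PySem.List.pyRange 0 (B + (B - 1)) 1).map
          (fun c => if PySem.Int.mod c 2 = 0 then C else (0 : Int)) := by
  by_cases hB : B ≤ 0
  · rw [PySem.List.pyRange_one_eq_nil hB, PySem.List.pyRange_one_eq_nil (by omega)]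
    simp
    omega
  · have hA := pv_colsA C B (B - 1).toNat 0 [] (by omega)
    rw [List.nil_append] at hA
    rw [hA]
    rw [if_neg (by rw [pvGPat_len]; push_cast; omega)]
    have hBb := pv_colsB C (B - 1).toNat
    rw [show 2 * (((B - 1).toNat : Nat) : Int) + 1 = B + (B - 1) by omega] at hBb
    rw [hBb]

-- flags are 0/1
lemma pv_flags_mem (n : Int) : ∀ (l : List Int) (i : Int) (f : Int),
    f ∈ pvFlags n i l → f = 0 ∨ f = 1 := by
  intro l
  induction l with
  | nil => intro i f hf; simp [pvFlags] at hf
  | cons a t ih =>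
    intro i f hf
    simp only [pvFlags, List.mem_append] at hf
    rcases hf with (hf | hf) | hf
    · right; exact List.eq_of_mem_replicate hf
    · left
      split at hf
      · simpa using hf
      · simp at hf
    · exact ih (i + 1) f hf

-- length of the flag sequence
lemma pv_flags_len (n : Int) : ∀ (l : List Int) (i : Int),
    (pvFlags n i l).length = (l.map Int.toNat).sum + min l.length (n - 1 - i).toNat := by
  intro l
  induction l with
  | nil => intro i; simp [pvFlags]
  | cons a t ih =>
    intro i
    simp only [pvFlags, List.length_append, List.length_replicate, List.map_cons, List.sum_cons,
      List.length_cons]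
    rw [ih (i + 1)]
    by_cases hsep : i < n - 1
    · rw [if_pos hsep]
      simp only [List.length_cons, List.length_nil]
      have : min (t.length + 1) (n - 1 - i).toNat = 1 + min t.length (n - 1 - (i + 1)).toNat := by
        omega
      omega
    · rw [if_neg hsep]
      simp only [List.length_nil]
      have h1 : (n - 1 - i).toNat = 0 := by omega
      have h2 : (n - 1 - (i + 1)).toNat = 0 := by omega
      rw [h1, h2]
      omega

-- B's line-emitting fold renders the flag sequence
lemma pv_linesB (n : Int) (nav ag : String) : ∀ (l : List Int) (i : Int) (acc : List String),
    (PySem.List.enumerate l i).foldl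
      (fun acc p => (acc ++ List.replicate p.2.toNat (nav ++ " 1")) ++
                    (if p.1 < n - 1 then [ag ++ " 0"] else [])) acc
    = acc ++ (pvFlags n i l).map (fun f => if f = 1 then nav ++ " 1" else ag ++ " 0") := by
  intro l
  induction l with
  | nil => intro i acc; simp [pvFlags, PySem.List.enumerate_nil]
  | cons a t ih =>
    intro i acc
    rw [PySem.List.enumerate_cons]
    simp only [List.foldl_cons]
    rw [ih (i + 1)]
    simp only [pvFlags, List.map_append, List.map_replicate]
    by_cases hsep : i < n - 1
    · rw [if_pos hsep, if_pos hsep]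
      simp [List.append_assoc]
    · rw [if_neg hsep, if_neg hsep]
      simp

-- an extension by zero-flags preserves the row/flag invariant
lemma pv_inv_ext (F ext : List Int) (W : List Bool)
    (hinv : ∀ r : Nat, W.getD r false = decide (F.getD r 0 = 1))
    (hext : ∀ x ∈ ext, x = 0) :
    ∀ r : Nat, W.getD r false = decide ((F ++ ext).getD r 0 = 1) := by
  intro r
  by_cases hr : r < F.length
  · rw [List.getD_append _ _ _ _ hr]
    exact hinv r
  · rw [List.getD_append_right _ _ _ _ (by omega)]
    rw [hinv r, List.getD_eq_default _ _ (by omega)]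
    by_cases hr2 : r - F.length < ext.length
    · rw [List.getD_eq_getElem _ _ hr2, hext _ (List.getElem_mem hr2)]
    · rw [List.getD_eq_default _ _ (by omega)]

-- past the ones block every padded flag entry is 0
lemma pv_flag_pad (F : List Int) (a : Int) (sep : List Int) (hsep : ∀ x ∈ sep, x = 0)
    (r : Nat) (hr : F.length + a.toNat ≤ r) :
    (F ++ (List.replicate a.toNat (1 : Int) ++ sep)).getD r 0 = 0 := by
  rw [List.getD_append_right _ _ _ _ (by omega)]
  rw [List.getD_append_right _ _ _ _ (by simp only [List.length_replicate]; omega)]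
  simp only [List.length_replicate]
  by_cases hz : r - F.length - a.toNat < sep.length
  · rw [List.getD_eq_getElem _ _ hz]
    exact hsep _ (List.getElem_mem hz)
  · exact List.getD_eq_default _ _ (by omega)

-- the marking loop computes "this row's flag is 1"
lemma pv_wchar (TLi n : Int) : ∀ (l : List Int) (i la : Int) (F : List Int) (W : List Bool),
    pvOk TLi n la F.length i l → ((W.length : Int) = TLi ∨ TLi ≤ 0) →
    (∀ r : Nat, W.getD r false = decide (F.getD r 0 = 1)) →
    ∀ r : Nat,
      (((PySem.List.enumerate l i).foldl (pvBItemStep n TLi) (la, F, W)).2.2).getD r false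
        = decide ((F ++ pvFlags n i l).getD r 0 = 1) := by
  intro l
  induction l with
  | nil =>
    intro i la F W _ _ hinv r
    simpa [pvFlags, PySem.List.enumerate_nil] using hinv r
  | cons a t ih =>
    intro i la F W hok hW hinv r
    rw [PySem.List.enumerate_cons]
    simp only [List.foldl_cons]
    have hok1 := hok.1
    have hok2 := hok.2
    -- the state after this item
    by_cases ha : 0 < a
    · obtain ⟨hla, hbd⟩ := hok1 ha
      have hT : 0 < TLi := by omega
      have hWlen : (W.length : Int) = TLi := by rcases hW with h | h; exact h; omega
      have hstep : pvBItemStep n TLi (la, F, W) (i, a)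
          = (la + a + (if i < n - 1 then 1 else 0),
             F ++ List.replicate a.toNat 1 ++ (if i < n - 1 then [(0 : Int)] else []),
             (PySem.List.pyRange la (la + a) 1).foldl (pvBMark TLi) W) := by
        simp only [pvBItemStep, if_pos hT]
        split
        · simp [List.append_assoc]
        · simp [List.append_assoc]
      set W' := (PySem.List.pyRange la (la + a) 1).foldl (pvBMark TLi) W with hW'
      have hRb : ∀ rr ∈ PySem.List.pyRange la (la + a) 1, -TLi ≤ rr ∧ rr < TLi := by
        intro rr hrr
        rw [PySem.List.mem_pyRange_one] at hrr
        omega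
      have hinv' : ∀ r : Nat, W'.getD r false
          = decide ((F ++ List.replicate a.toNat 1
              ++ (if i < n - 1 then [(0 : Int)] else [])).getD r 0 = 1) := by
        intro r
        by_cases hrW : r < W.length
        · rw [hW', pv_foldBMark TLi _ W hWlen hRb r hrW]
          have hex : (∃ rr ∈ PySem.List.pyRange la (la + a) 1, pvWrapIdx TLi rr = (r : Int))
              ↔ (la ≤ (r : Int) ∧ (r : Int) < la + a) := by
            constructor
            · rintro ⟨rr, hrr, hwr⟩
              rw [PySem.List.mem_pyRange_one] at hrr
              have : pvWrapIdx TLi rr = rr := by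
                simp only [pvWrapIdx]; rw [if_neg (by omega)]
              omega
            · intro hr
              refine ⟨(r : Int), ?_, ?_⟩
              · rw [PySem.List.mem_pyRange_one]; exact hr
              · simp only [pvWrapIdx]; rw [if_neg (by omega)]
          by_cases hhit : la ≤ (r : Int) ∧ (r : Int) < la + a
          · rw [if_pos (hex.mpr hhit)]
            rw [List.append_assoc, List.getD_append_right _ _ _ _ (by omega)]
            rw [List.getD_append _ _ _ _ (by simp; omega)]
            rw [List.getD_replicate _ (by simp; omega)]
            simp
          · rw [if_neg (fun h => hhit (hex.mp h)), hinv r]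
            by_cases hlt : r < F.length
            · rw [List.append_assoc, List.getD_append _ _ _ _ hlt]
            · -- r ≥ F.length and not in the ones block: the new entries there are 0
              have hge : la + a ≤ (r : Int) := by
                by_contra hcon
                exact hhit ⟨by omega, by omega⟩
              have h1 : F.getD r 0 = 0 := List.getD_eq_default _ _ (by omega)
              have h2 := pv_flag_pad F a (if i < n - 1 then [(0 : Int)] else [])
                (by split
                    · intro x hx; simpa using hx
                    · intro x hx; simp at hx)
                r (by omega)
              rw [List.append_assoc, h1, h2]
        · -- past the grid: stays false, and the flag there is 0 or default
          have hW'len : W'.length = W.length := by rw [hW']; exact pv_foldBMark_length _ _ _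
          rw [List.getD_eq_default _ _ (by omega)]
          -- F.length + a.toNat ≤ TLi.toNat ≤ r, so r is past the ones block
          have h2 := pv_flag_pad F a (if i < n - 1 then [(0 : Int)] else [])
            (by split
                · intro x hx; simpa using hx
                · intro x hx; simp at hx)
            r (by omega)
          rw [List.append_assoc, h2]
          simp
      have hok2' : pvOk TLi n (la + a + (if i < n - 1 then 1 else 0))
          (F ++ List.replicate a.toNat 1 ++ (if i < n - 1 then [(0 : Int)] else [])).length
          (i + 1) t := by
        have : (F ++ List.replicate a.toNat 1
            ++ (if i < n - 1 then [(0 : Int)] else [])).length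
            = F.length + a.toNat + (if i < n - 1 then 1 else 0 : Nat) := by
          simp only [List.length_append, List.length_replicate]
          split <;> simp
        rw [this]
        exact hok2
      rw [hstep]
      have := ih (i + 1) (la + a + (if i < n - 1 then 1 else 0))
        (F ++ List.replicate a.toNat 1 ++ (if i < n - 1 then [(0 : Int)] else [])) W'
        hok2' (by left; rw [hW', pv_foldBMark_length]; exact hWlen) hinv' r
      rw [this]
      congr 2
      simp only [pvFlags, List.append_assoc]
    · -- non-positive item: no rows, no one-flags
      have hrange : PySem.List.pyRange la (la + a) 1 = [] :=
        PySem.List.pyRange_one_eq_nil (by omega)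
      have hrep : List.replicate a.toNat (1 : Int) = [] := by
        rw [show a.toNat = 0 by omega]
        rfl
      have hstep : pvBItemStep n TLi (la, F, W) (i, a)
          = (la + a + (if i < n - 1 then 1 else 0),
             F ++ (if i < n - 1 then [(0 : Int)] else []), W) := by
        simp only [pvBItemStep, hrange, List.foldl_nil, hrep, List.append_nil, ite_self]
        split
        · simp
        · simp
      have hinv' : ∀ r : Nat,
          W.getD r false = decide ((F ++ (if i < n - 1 then [(0 : Int)] else [])).getD r 0 = 1) := by
        apply pv_inv_ext F _ W hinv
        intro x hx
        split at hx
        · simpa using hx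
        · simp at hx
      have hok2' : pvOk TLi n (la + a + (if i < n - 1 then 1 else 0))
          (F ++ (if i < n - 1 then [(0 : Int)] else [])).length (i + 1) t := by
        have : (F ++ (if i < n - 1 then [(0 : Int)] else [])).length
            = F.length + a.toNat + (if i < n - 1 then 1 else 0 : Nat) := by
          simp only [List.length_append]
          split <;> simp <;> omega
        rw [this]
        exact hok2
      rw [hstep]
      have := ih (i + 1) (la + a + (if i < n - 1 then 1 else 0))
        (F ++ (if i < n - 1 then [(0 : Int)] else [])) W hok2' hW hinv' r
      rw [this]
      congr 2
      simp only [pvFlags, hrep, List.nil_append, List.append_assoc]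

-- Pre_'s no-drift clause gives the alignment predicate
lemma pv_ok_bridge (TLi n : Int) : ∀ (l : List Int) (i la : Int) (flen : Nat),
    (∀ k : Nat, k < l.length → 0 < l.getD k 0 →
      la + (l.take k).sum = (flen : Int) + ((((l.take k).map Int.toNat).sum : Nat) : Int)) →
    ((flen : Int) + (((l.map Int.toNat).sum : Nat) : Int)
        + ((min l.length (n - 1 - i).toNat : Nat) : Int) ≤ TLi ∨ ∀ x ∈ l, x ≤ 0) →
    pvOk TLi n la flen i l := by
  intro l
  induction l with
  | nil => intro i la flen _ _; trivial
  | cons a t ih =>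
    intro i la flen hdrift hbnd
    constructor
    · intro ha
      have h0 := hdrift 0 (by simp) (by simpa using ha)
      simp only [List.take_zero, List.sum_nil, List.map_nil, Nat.cast_zero, add_zero] at h0
      refine ⟨h0, ?_⟩
      rcases hbnd with hb | hb
      · rw [List.map_cons, List.sum_cons] at hb
        omega
      · exact absurd (hb a (by simp)) (by omega)
    · apply ih (i + 1)
      · intro k hk hpos
        have h := hdrift (k + 1) (by simpa using Nat.succ_lt_succ hk) (by simpa using hpos)
        simp only [List.take_succ_cons, List.sum_cons, List.map_cons] at h
        by_cases hsep : i < n - 1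
        · simp only [if_pos hsep]; omega
        · simp only [if_neg hsep]; omega
      · rcases hbnd with hb | hb
        · left
          rw [List.map_cons, List.sum_cons, List.length_cons] at hb
          by_cases hsep : i < n - 1
          · simp only [if_pos hsep]; omega
          · simp only [if_neg hsep]; omega
        · right
          exact fun x hx => hb x (by simp [hx])

-- per-flag rendering: one output line of A equals one of B
lemma pv_line_eq (nav ag : String) (f : Int) (hf : f = 0 ∨ f = 1) :
    (if f = 1 then nav else ag) ++ " " ++ PySem.Int.toStr f
      = (if f = 1 then nav ++ " 1" else ag ++ " 0") := by
  rcases hf with rfl | rfl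
  · rw [if_neg (by decide), if_neg (by decide), String.append_assoc]
    congr 1
  · rw [if_pos rfl, if_pos rfl, String.append_assoc]
    congr 1

-- ===== VERDICT (by name: the statement is the Claim_ definition above) =====
theorem bin_packing_para_batalha_naval_spec : Claim_equal_bin_packing_para_batalha_naval := by
  intro n C B l hdom hpre
  obtain ⟨hsum, hflen, hdrift⟩ := hpre
  unfold Spec_bin_packing_para_batalha_naval
  unfold bin_packing_para_batalha_naval bin_packing_para_batalha_naval_alt
  rw [if_neg (show ¬ l.sum ≠ C * B from fun h => h hsum),
      if_neg (show ¬ l.sum ≠ C * B from fun h => h hsum)]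
  simp only []
  rw [show 2 * B - 1 = B + (B - 1) by ring]
  set T := l.sum + (n - 1) with hT
  -- both column-counter lists agree
  rw [pv_cols]
  -- B's emitted lines are the rendered flag sequence
  rw [pv_linesB n _ _ l 0 []]
  rw [List.nil_append]
  -- flag bookkeeping
  have hflen' : ((pvFlags n 0 l).length : Int) = max T 0 := by
    rw [pv_flags_len]
    rw [show n - 1 - 0 = n - 1 by ring]
    omega
  have hlenT : (pvFlags n 0 l).length = T.toNat := by omega
  -- A's line fold as a map
  rw [PySem.List.foldl_append_singleton_eq_map, List.nil_append]
  by_cases hB : 1 ≤ B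
  · -- at least one bin: the grid simulates the row marks through the templates
    have hok : pvOk T n 0 0 0 l := by
      apply pv_ok_bridge
      · intro k hk hpos
        have := hdrift hB k hk hpos
        omega
      · by_cases hall : ∀ x ∈ l, x ≤ 0
        · right; exact hall
        · left
          push_neg at hall
          obtain ⟨x, hx, hxpos⟩ := hall
          have h1 : 1 ≤ (l.map Int.toNat).sum := by
            calc 1 ≤ x.toNat := by omega
            _ ≤ (l.map Int.toNat).sum :=
              List.single_le_sum (fun _ _ => Nat.zero_le _) _ (List.mem_map_of_mem hx)
          -- then max T 0 ≥ 1, so T ≥ 1 and the flag count fits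
          have hT0 : 1 ≤ max T 0 := by omega
          omega
    have hgr0 : (PySem.List.pyRange 0 T 1).map
        (fun _ => (PySem.List.pyRange 0 (B + (B - 1)) 1).map (fun _ => "~"))
        = (List.replicate T.toNat false).map (pvRowB (B + (B - 1))) := by
      rw [show (PySem.List.pyRange 0 (B + (B - 1)) 1).map (fun _ => "~") = pvWater (B + (B - 1))
        from rfl]
      rw [List.map_const', PySem.List.length_pyRange_one, List.map_replicate]
      rw [show pvRowB (B + (B - 1)) false = pvWater (B + (B - 1)) from rfl]
      rw [show (T - 0).toNat = T.toNat by omega]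
    rw [hgr0]
    rw [pv_mainAB n B T hB l 0 0 0 [] (List.replicate T.toNat false) (by simp) hok]
    set Wf := ((PySem.List.enumerate l 0).foldl (pvBItemStep n T)
      (0, ([] : List Int), List.replicate T.toNat false)).2.2 with hWf
    have hWf_len : Wf.length = T.toNat := by
      rw [hWf, pv_navioB_len, List.length_replicate]
    rw [pv_sep_passB (B + (B - 1)) T Wf (by omega)]
    have hWchar : ∀ r : Nat, Wf.getD r false = decide ((pvFlags n 0 l).getD r 0 = 1) := by
      have := pv_wchar T n l 0 0 [] (List.replicate T.toNat false)
        (by simpa using hok)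
        (by by_cases h : 0 ≤ T
            · left; simp; omega
            · right; omega)
        (by intro r
            rw [List.getD_eq_default (([] : List Int)) _ (by simp)]
            by_cases hr : r < T.toNat
            · rw [List.getD_eq_getElem _ _ (by simpa using hr), List.getElem_replicate]
              rfl
            · rw [List.getD_eq_default _ _ (by simpa using hr)]
              rfl)
      intro r
      simpa using this r
    -- A's contagem is the flag sequence too
    have hcontA : ((PySem.List.enumerate l 0).foldl (pvBItemStep n T)
        (0, ([] : List Int), List.replicate T.toNat false)).2.1 = pvFlags n 0 l := by
      have h1 := pv_flagsA n B l 0 (0, ([] : List Int),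
        (List.replicate T.toNat false).map (pvRowB (B + (B - 1))))
      rw [pv_mainAB n B T hB l 0 0 0 [] (List.replicate T.toNat false) (by simp) hok] at h1
      simpa using h1
    rw [hcontA]
    -- pointwise equality of the row lines
    rw [List.append_assoc]
    simp only [List.singleton_append]
    refine congrArg (PySem.Str.join "\n") (congrArg (fun x => x ++ _) ?_)
    apply List.ext_getElem
    · rw [List.length_map, List.length_map, PySem.List.length_pyRange_one, hlenT]
      omega
    · intro k h1 h2
      have hkT : k < T.toNat := by
        rw [List.length_map, PySem.List.length_pyRange_one] at h1
        omega
      rw [List.getElem_map, List.getElem_map, PySem.List.getElem_pyRange_one]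
      rw [show (0 : Int) + (k : Int) = (k : Int) by ring]
      rw [PySem.List.pyGetD_natCast, PySem.List.pyGetD_natCast]
      rw [List.getD_eq_getElem _ _ (by rw [List.length_map]; omega), List.getElem_map]
      rw [← List.getD_eq_getElem Wf false (by omega)]
      rw [hWchar k]
      have hfk : (pvFlags n 0 l).getD k 0 = (pvFlags n 0 l)[k]'(by omega) :=
        List.getD_eq_getElem _ _ (by omega)
      have hmem : (pvFlags n 0 l)[k]'(by omega) = 0 ∨ (pvFlags n 0 l)[k]'(by omega) = 1 :=
        pv_flags_mem n l 0 _ (List.getElem_mem _)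
      rw [hfk]
      rcases hmem with hv | hv
      · rw [hv]
        rw [show (decide ((0 : Int) = 1)) = false by decide]
        rw [show pvRowB (B + (B - 1)) false = pvWater (B + (B - 1)) from rfl]
        have := pv_line_eq (PySem.Str.join " " (pvShip (B + (B - 1))))
          (PySem.Str.join " " (pvWater (B + (B - 1)))) 0 (Or.inl rfl)
        rw [if_neg (by decide)] at this
        rw [this, if_neg (by decide)]
        rfl
      · rw [hv]
        rw [show (decide ((1 : Int) = 1)) = true by decide]
        rw [show pvRowB (B + (B - 1)) true = pvShip (B + (B - 1)) from rfl]
        have := pv_line_eq (PySem.Str.join " " (pvShip (B + (B - 1))))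
          (PySem.Str.join " " (pvWater (B + (B - 1)))) 1 (Or.inr rfl)
        rw [if_pos rfl] at this
        rw [this, if_pos rfl]
        rfl
  · -- no bins: the grid never changes and both templates are the empty row
    have hB0 : B ≤ 0 := by omega
    have htc : B + (B - 1) ≤ 0 := by omega
    rw [pv_gradeA_Ble0 n B hB0 l 0]
    rw [pv_flagsA n B l 0]
    simp only [List.nil_append]
    have hnil : PySem.List.pyRange 0 (B + (B - 1)) 1 = [] := PySem.List.pyRange_one_eq_nil htc
    -- the odd-column pass iterates over no columns at all
    simp only [hnil, List.foldl_nil]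
    rw [List.append_assoc]
    simp only [List.singleton_append]
    refine congrArg (PySem.Str.join "\n") (congrArg (fun x => x ++ _) ?_)
    apply List.ext_getElem
    · rw [List.length_map, List.length_map, PySem.List.length_pyRange_one, hlenT]
      omega
    · intro k h1 h2
      have hkT : k < T.toNat := by
        rw [List.length_map, PySem.List.length_pyRange_one] at h1
        omega
      rw [List.getElem_map, List.getElem_map, PySem.List.getElem_pyRange_one]
      rw [show (0 : Int) + (k : Int) = (k : Int) by ring]
      rw [PySem.List.pyGetD_natCast, PySem.List.pyGetD_natCast]
      have hgrow : ((PySem.List.pyRange 0 T 1).map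
          (fun _ => ([] : List Int).map (fun _ => "~"))).getD k [] = ([] : List String) := by
        rw [List.getD_eq_getElem _ _ (by rw [List.length_map, PySem.List.length_pyRange_one]; omega)]
        rw [List.getElem_map]
        rfl
      have hfk : (pvFlags n 0 l).getD k 0 = (pvFlags n 0 l)[k]'(by omega) :=
        List.getD_eq_getElem _ _ (by omega)
      have hmem : (pvFlags n 0 l)[k]'(by omega) = 0 ∨ (pvFlags n 0 l)[k]'(by omega) = 1 :=
        pv_flags_mem n l 0 _ (List.getElem_mem _)
      rw [hgrow, hfk]
      rcases hmem with hv | hv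
      · rw [hv, if_neg (by decide)]
        decide
      · rw [hv, if_pos rfl]
        decide
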